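-- pv_equiv track=rewrite | github.com/OPERA-byte/Cipher-Method-Library-Py3 | Vigenere.py | preapend_dictionary_key_to_base_alphabet
-- ===== SOURCE A (Python) =====
-- def preapend_dictionary_key_to_base_alphabet(dictionary_key):
--     """
--         Prepend the characters of the dictionary key to the base alphabet.
--
--         Args:
--             dictionary_key (str): The key to prepend to the base alphabet.
--
--         Returns:
--             list: The modified base alphabet with dictionary key characters prepended.
--     """
--     alphabet = (["A", "B", "C", "D", "E", "F",
--                  "G", "H", "I", "J", "K", "L", "M",
--                  "N", "O", "P", "Q", "R", "S", "T",
--                  "U", "V", "W", "X", "Y", "Z"])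
--     temp_character = ''
--     for i in range(len(dictionary_key)):
--         temp_character = dictionary_key[(len(dictionary_key) - 1) - i]
--         alphabet.remove(temp_character)
--         alphabet.insert(0, temp_character)
--     return alphabet
-- ===== SOURCE B (Python) =====
-- def preapend_dictionary_key_to_base_alphabet(dictionary_key):
--     alphabet = ["A", "B", "C", "D", "E", "F",
--                 "G", "H", "I", "J", "K", "L", "M",
--                 "N", "O", "P", "Q", "R", "S", "T",
--                 "U", "V", "W", "X", "Y", "Z"]
--     base = set(alphabet)
--     seen = set()
--     result = []
--     for ch in dictionary_key:
--         if ch not in base: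
--             raise ValueError(f"{ch!r} is not in the alphabet")
--         if ch not in seen:
--             seen.add(ch)
--             result.append(ch)
--     for letter in alphabet:
--         if letter not in seen:
--             result.append(letter)
--     return result
-- ===== Notes on version B (the rewrite author's own statement) =====
-- stated objective: simpler
-- what changed: A walks the key backwards, mutating the alphabet with remove() plus insert(0, ...) on every step; B does one forward pass with a seen-set collecting first occurrences, then appends the unused base letters in a second pass.
import Mathlib
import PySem

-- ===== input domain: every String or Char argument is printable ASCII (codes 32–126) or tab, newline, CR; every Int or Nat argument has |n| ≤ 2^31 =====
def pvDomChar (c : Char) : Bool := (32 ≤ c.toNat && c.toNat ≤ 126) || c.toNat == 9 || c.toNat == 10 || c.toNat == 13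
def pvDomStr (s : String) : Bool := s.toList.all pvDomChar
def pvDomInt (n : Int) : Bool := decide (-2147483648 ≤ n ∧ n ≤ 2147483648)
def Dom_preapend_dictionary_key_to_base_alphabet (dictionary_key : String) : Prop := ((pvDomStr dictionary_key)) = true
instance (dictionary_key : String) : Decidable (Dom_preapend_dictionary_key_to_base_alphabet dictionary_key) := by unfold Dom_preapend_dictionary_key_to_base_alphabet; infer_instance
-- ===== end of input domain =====

-- B replaces A's backward remove/insert-at-front mutation loop by a forward seen-set pass plus a tail pass (objective: simpler decomposition).


-- ===== PORT A =====
-- one loop iteration of A: alphabet.remove(tc); alphabet.insert(0, tc)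
def pvAStep (alphabet : List String) (tc : String) : List String :=
  match PySem.List.remove? alphabet tc with
  | none => alphabet                      -- ValueError: excluded by Pre_
  | some l => PySem.List.insert l 0 tc

def preapend_dictionary_key_to_base_alphabet (dictionary_key : String) : List String :=
  let alphabet : List String := ["A", "B", "C", "D", "E", "F",
                                 "G", "H", "I", "J", "K", "L", "M",
                                 "N", "O", "P", "Q", "R", "S", "T",
                                 "U", "V", "W", "X", "Y", "Z"]
  let n : Int := PySem.Str.len dictionary_key
  (PySem.List.pyRange 0 n 1).foldl
    (fun alphabet i =>
      match PySem.Str.pyGet? dictionary_key ((n - 1) - i) with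
      | none => alphabet                  -- unreachable: the index is always in range
      | some temp_character => pvAStep alphabet (String.ofList [temp_character]))
    alphabet

-- ===== PORT B =====
-- one loop iteration of B: check membership in the base alphabet, then the seen-set test
def pvBStep (base : PySem.Set String) (st : PySem.Set String × List String) (ch : String) :
    PySem.Set String × List String :=
  if !(PySem.Set.contains base ch) then st        -- raise ValueError: excluded by Pre_
  else if PySem.Set.contains st.1 ch then st
  else (PySem.Set.add st.1 ch, st.2 ++ [ch])

def preapend_dictionary_key_to_base_alphabet_alt (dictionary_key : String) : List String :=
  let alphabet : List String := ["A", "B", "C", "D", "E", "F",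
                                 "G", "H", "I", "J", "K", "L", "M",
                                 "N", "O", "P", "Q", "R", "S", "T",
                                 "U", "V", "W", "X", "Y", "Z"]
  let base : PySem.Set String := PySem.Set.ofList alphabet
  let st := dictionary_key.toList.foldl
    (fun st ch => pvBStep base st (String.ofList [ch])) (PySem.Set.empty, [])
  st.2 ++ alphabet.filter (fun letter => !(PySem.Set.contains st.1 letter))

-- ===== PRECONDITION & SPEC =====
-- the 26 uppercase letters, as characters
def pvUpper : List Char := ['A','B','C','D','E','F','G','H','I','J','K','L','M',
                            'N','O','P','Q','R','S','T','U','V','W','X','Y','Z']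

-- Pre_ excludes exactly the keys containing a character outside A–Z: there A raises
-- ValueError (list.remove on a missing element), and B raises ValueError as well.
def Pre_preapend_dictionary_key_to_base_alphabet (dictionary_key : String) : Prop :=
  dictionary_key.toList.all (fun c => pvUpper.contains c) = true
instance (dictionary_key : String) : Decidable (Pre_preapend_dictionary_key_to_base_alphabet dictionary_key) := by unfold Pre_preapend_dictionary_key_to_base_alphabet; infer_instance

def pvWitness_preapend_dictionary_key_to_base_alphabet : String := "KEY"

def Spec_preapend_dictionary_key_to_base_alphabet (dictionary_key : String) (out : List String) : Prop := out = preapend_dictionary_key_to_base_alphabet_alt dictionary_key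
instance (dictionary_key : String) (out : List String) : Decidable (Spec_preapend_dictionary_key_to_base_alphabet dictionary_key out) := by unfold Spec_preapend_dictionary_key_to_base_alphabet; infer_instance

-- ===== CLAIM (what is proved, stated in full; the proofs are below) =====
def Claim_equal_preapend_dictionary_key_to_base_alphabet : Prop := ∀ (dictionary_key : String), Dom_preapend_dictionary_key_to_base_alphabet dictionary_key → Pre_preapend_dictionary_key_to_base_alphabet dictionary_key → Spec_preapend_dictionary_key_to_base_alphabet dictionary_key (preapend_dictionary_key_to_base_alphabet dictionary_key)

-- ===== LEMMAS AND PROOFS =====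

-- the base alphabet, named for the proofs
def pvALPHA : List String := ["A", "B", "C", "D", "E", "F",
                              "G", "H", "I", "J", "K", "L", "M",
                              "N", "O", "P", "Q", "R", "S", "T",
                              "U", "V", "W", "X", "Y", "Z"]

def pvSingle (c : Char) : String := String.ofList [c]

-- the common canonical form both programs compute (a recursion on the key's characters)
def pvF : List Char → List String
  | [] => pvALPHA
  | c :: t => pvSingle c :: (pvF t).erase (pvSingle c)

-- the elements of l that are new w.r.t. `seen`, in first-occurrence order
def pvNews (seen : List String) : List String → List String
  | [] => []
  | y :: t => if seen.contains y then pvNews seen t else y :: pvNews (seen ++ [y]) t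

theorem pvNews_congr (l : List String) (s₁ s₂ : List String)
    (h : ∀ a, s₁.contains a = s₂.contains a) : pvNews s₁ l = pvNews s₂ l := by
  induction l generalizing s₁ s₂ with
  | nil => rfl
  | cons y t ih =>
      simp only [pvNews, h y]
      split
      · exact ih s₁ s₂ h
      · refine congrArg (y :: ·) (ih _ _ ?_)
        intro a
        simp only [List.contains_append, h a]

theorem pvNews_append_erase (l : List String) (s : List String) (x : String) :
    pvNews (s ++ [x]) l = (pvNews s l).erase x := by
  induction l generalizing s with
  | nil => rfl
  | cons y t ih =>
      by_cases hy : s.contains y = true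
      · have h1 : (s ++ [x]).contains y = true := by
          simp only [List.contains_append, hy, Bool.true_or]
        simp only [pvNews, hy, h1, if_true, ih s]
      · have hy' : s.contains y = false := by simpa using hy
        by_cases hyx : y = x
        · subst hyx
          have h1 : (s ++ [y]).contains y = true := by
            simp
          simp only [pvNews, hy', Bool.false_eq_true, if_false, h1, if_true,
            List.erase_cons_head]
        · have hbe : (y == x) = false := by simp [hyx]
          have h1 : (s ++ [x]).contains y = false := by
            simp only [List.contains_append, hy', List.contains_cons, List.contains_nil, hbe,
              Bool.or_self]
          simp only [pvNews, hy', h1, Bool.false_eq_true, if_false]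
          rw [List.erase_cons_tail (by simp [hbe]), ← ih (s ++ [y])]
          refine congrArg (y :: ·) (pvNews_congr _ _ _ ?_)
          intro a
          simp only [List.contains_append, List.contains_cons, List.contains_nil]
          cases (a == x) <;> cases (a == y) <;> cases s.contains a <;> rfl

theorem pvUpdate_eq (l : List String) (s : PySem.Set String) :
    PySem.Set.update s l = s ++ pvNews s l := by
  induction l generalizing s with
  | nil => simp [PySem.Set.update, pvNews]
  | cons y t ih =>
      simp only [PySem.Set.update] at ih ⊢
      by_cases hy : List.contains s y = true
      · rw [List.foldl_cons, show PySem.Set.add s y = s from by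
          simp only [PySem.Set.add, PySem.Set.contains, hy, if_true], ih s]
        simp only [pvNews, hy, if_true]
      · have hy' : List.contains s y = false := by simpa using hy
        rw [List.foldl_cons, show PySem.Set.add s y = s ++ [y] from by
          simp only [PySem.Set.add, PySem.Set.contains, hy', Bool.false_eq_true, if_false],
          ih (s ++ [y])]
        simp only [pvNews, hy', Bool.false_eq_true, if_false, List.append_assoc,
          List.singleton_append]

theorem pvOfList_eq (l : List String) : PySem.Set.ofList l = pvNews [] l := by
  have := pvUpdate_eq l PySem.Set.empty
  simpa [PySem.Set.ofList, PySem.Set.update, PySem.Set.empty] using this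

theorem mem_pvNews_nil (l : List String) (a : String) : a ∈ pvNews [] l ↔ a ∈ l := by
  rw [← pvOfList_eq]; exact PySem.Set.mem_ofList l a

-- every uppercase letter is in the base alphabet
theorem pvValid_mem_ALPHA {c : Char} (h : c ∈ pvUpper) : pvSingle c ∈ pvALPHA := by
  fin_cases h <;> decide

-- B's loop, characterised: starting from (seen, res) it ends in
-- (seen updated with the new letters, res extended by exactly those new letters in order)
theorem pvBfold (l : List Char) (seen : PySem.Set String) (res : List String)
    (h : ∀ c ∈ l, c ∈ pvUpper) :
    l.foldl (fun st ch => pvBStep (PySem.Set.ofList pvALPHA) st (String.ofList [ch])) (seen, res)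
      = (PySem.Set.update seen (l.map pvSingle), res ++ pvNews seen (l.map pvSingle)) := by
  induction l generalizing seen res with
  | nil => simp [PySem.Set.update, pvNews]
  | cons c t ih =>
      have hc : c ∈ pvUpper := h c (List.mem_cons_self ..)
      have hbase : List.contains (PySem.Set.ofList pvALPHA) (pvSingle c) = true := by
        simp only [List.contains_iff_mem]
        exact (PySem.Set.mem_ofList _ _).2 (pvValid_mem_ALPHA hc)
      have ht : ∀ c ∈ t, c ∈ pvUpper := fun x hx => h x (List.mem_cons_of_mem _ hx)
      have hsc : String.ofList [c] = pvSingle c := rfl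
      simp only [List.foldl_cons, List.map_cons]
      by_cases hSeen : List.contains seen (pvSingle c) = true
      · have hstep : pvBStep (PySem.Set.ofList pvALPHA) (seen, res) (String.ofList [c])
            = (seen, res) := by
          simp only [pvBStep, hsc, PySem.Set.contains, hbase, hSeen, Bool.not_true,
            Bool.false_eq_true, if_false, if_true]
        rw [hstep, ih seen res ht]
        have hadd : PySem.Set.add seen (pvSingle c) = seen := by
          simp only [PySem.Set.add, PySem.Set.contains, hSeen, if_true]
        simp only [PySem.Set.update, List.foldl_cons, hadd, pvNews, hSeen, if_true]
      · have hSeen' : List.contains seen (pvSingle c) = false := by simpa using hSeen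
        have hadd : PySem.Set.add seen (pvSingle c) = seen ++ [pvSingle c] := by
          simp only [PySem.Set.add, PySem.Set.contains, hSeen', Bool.false_eq_true, if_false]
        have hstep : pvBStep (PySem.Set.ofList pvALPHA) (seen, res) (String.ofList [c])
            = (seen ++ [pvSingle c], res ++ [pvSingle c]) := by
          simp only [pvBStep, hsc, PySem.Set.contains, hbase, hSeen', Bool.not_true,
            Bool.false_eq_true, if_false, hadd]
        rw [hstep, ih _ _ ht]
        simp only [PySem.Set.update, List.foldl_cons, hadd, pvNews, hSeen', Bool.false_eq_true,
          if_false]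
        simp

-- the canonical form, reached from B's side
theorem pvP (cs : List Char) (h : ∀ c ∈ cs, c ∈ pvUpper) :
    pvNews [] (cs.map pvSingle)
      ++ pvALPHA.filter (fun a => !((cs.map pvSingle).contains a)) = pvF cs := by
  induction cs with
  | nil => simp [pvNews, pvF]
  | cons c t ih =>
      have hc : c ∈ pvUpper := h c (List.mem_cons_self ..)
      have ht : ∀ x ∈ t, x ∈ pvUpper := fun x hx => h x (List.mem_cons_of_mem _ hx)
      set s := pvSingle c with hs
      set smst := t.map pvSingle with hsm
      have hmapcons : (c :: t).map pvSingle = s :: smst := by simp [hs, hsm]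
      rw [hmapcons]
      have hnews : pvNews [] (s :: smst) = s :: pvNews [s] smst := by
        simp [pvNews]
      have herase : pvNews ([] ++ [s]) smst = (pvNews [] smst).erase s :=
        pvNews_append_erase smst [] s
      simp only [List.nil_append] at herase
      rw [hnews, pvF, ← ih ht]
      by_cases hmem : s ∈ smst
      · -- s already occurs later: the filter sets agree, erase hits the dedup part
        have hfil : pvALPHA.filter (fun a => !((s :: smst).contains a))
            = pvALPHA.filter (fun a => !(smst.contains a)) := by
          apply List.filter_congr
          intro a _
          by_cases hax : a = s
          · subst hax; simp [hmem]
          · simp [hax]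
        have hmemnews : s ∈ pvNews [] smst := (mem_pvNews_nil smst s).2 hmem
        rw [hfil, List.erase_append_left _ hmemnews, herase]
        simp [hs]
      · -- s is new: erase hits the filter part
        have hnot : s ∉ pvNews [] smst := fun hx => hmem ((mem_pvNews_nil smst s).1 hx)
        rw [List.erase_append_right _ hnot, herase, List.erase_of_not_mem hnot]
        refine congrArg (s :: ·) (congrArg (pvNews [] smst ++ ·) ?_)
        have hnodup : (pvALPHA.filter (fun a => !(smst.contains a))).Nodup :=
          List.Nodup.filter _ (by decide)
        rw [hnodup.erase_eq_filter, List.filter_filter]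
        apply List.filter_congr
        intro a _
        by_cases hax : a = s
        · subst hax; simp [hmem]
        · simp [hax]

-- s is never missing from pvF t when s is an uppercase letter
theorem pvMem_pvF {c : Char} (h : c ∈ pvUpper) (t : List Char) : pvSingle c ∈ pvF t := by
  induction t with
  | nil => exact pvValid_mem_ALPHA h
  | cons d t ih =>
      by_cases hcd : pvSingle c = pvSingle d
      · simp [pvF, hcd]
      · exact List.mem_cons_of_mem _ (List.mem_erase_of_ne hcd |>.2 ih)

-- A's loop in foldr form equals the canonical form
theorem pvAfoldr (cs : List Char) (h : ∀ c ∈ cs, c ∈ pvUpper) :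
    cs.foldr (fun c al => pvAStep al (pvSingle c)) pvALPHA = pvF cs := by
  induction cs with
  | nil => rfl
  | cons c t ih =>
      have hc : c ∈ pvUpper := h c (List.mem_cons_self ..)
      have ht : ∀ x ∈ t, x ∈ pvUpper := fun x hx => h x (List.mem_cons_of_mem _ hx)
      simp only [List.foldr_cons, ih ht]
      have hmem : pvSingle c ∈ pvF t := pvMem_pvF hc t
      simp [pvAStep, PySem.List.remove?_eq_some_erase _ _ hmem, PySem.List.insert_zero, pvF]

-- A's index loop over range(len) is the foldr over the characters (no precondition needed)
theorem pvAport (dictionary_key : String) :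
    preapend_dictionary_key_to_base_alphabet dictionary_key
      = dictionary_key.toList.foldr (fun c al => pvAStep al (pvSingle c)) pvALPHA := by
  unfold preapend_dictionary_key_to_base_alphabet
  simp only [PySem.Str.len_eq]
  set cs := dictionary_key.toList with hcs
  set m := cs.length with hm
  rw [PySem.List.pyRange_zero]
  simp only [Int.toNat_natCast, List.foldl_map]
  have hstep : ∀ (al : List String), ∀ k ∈ List.range m,
      (fun (alphabet : List String) (i : Int) =>
        match PySem.Str.pyGet? dictionary_key (((m : Int) - 1) - i) with
        | none => alphabet
        | some temp_character => pvAStep alphabet (String.ofList [temp_character])) al ((k : Int))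
      = pvAStep al (pvSingle (cs.getD (m - 1 - k) 'A')) := by
    intro al k hk
    rw [List.mem_range] at hk
    show (match PySem.Str.pyGet? dictionary_key (((m : Nat) : Int) - 1 - ((k : Nat) : Int)) with
      | none => al
      | some temp_character => pvAStep al (String.ofList [temp_character]))
      = pvAStep al (pvSingle (cs.getD (m - 1 - k) 'A'))
    have hidx : ((m : Int) - 1) - (k : Int) = ((m - 1 - k : Nat) : Int) := by omega
    rw [hidx]
    have : PySem.Str.pyGet? dictionary_key ((m - 1 - k : Nat) : Int) = cs[(m - 1 - k)]? :=
      PySem.Str.pyGet?_natCast dictionary_key (m - 1 - k)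
    rw [this, List.getElem?_eq_getElem (by omega)]
    simp only [pvSingle, List.getD,
      List.getElem?_eq_getElem (show m - 1 - k < cs.length from by omega), Option.getD_some]
  rw [PySem.List.foldl_congr_mem _ _ _ _ hstep]
  have hrev : (List.range m).map (fun k => cs.getD (m - 1 - k) 'A') = cs.reverse := by
    apply List.ext_getElem
    · simp [hm]
    · intro i h1 h2
      simp only [List.getElem_map, List.getElem_range, List.getElem_reverse]
      have hi : i < m := by simpa using h1
      rw [List.getD_eq_getElem _ _ (by omega : m - 1 - i < cs.length)]
  rw [← List.foldl_map (f := fun k => cs.getD (m - 1 - k) 'A')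
        (g := fun al x => pvAStep al (pvSingle x)), hrev, List.foldl_reverse]
  rfl

-- B's program equals the canonical form
theorem pvBside (dictionary_key : String)
    (h : ∀ c ∈ dictionary_key.toList, c ∈ pvUpper) :
    preapend_dictionary_key_to_base_alphabet_alt dictionary_key = pvF dictionary_key.toList := by
  rw [show preapend_dictionary_key_to_base_alphabet_alt dictionary_key
      = (dictionary_key.toList.foldl
          (fun st ch => pvBStep (PySem.Set.ofList pvALPHA) st (String.ofList [ch]))
          (PySem.Set.empty, [])).2
        ++ pvALPHA.filter (fun letter =>
            !(PySem.Set.contains (dictionary_key.toList.foldl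
              (fun st ch => pvBStep (PySem.Set.ofList pvALPHA) st (String.ofList [ch]))
              (PySem.Set.empty, [])).1 letter)) from rfl]
  rw [pvBfold dictionary_key.toList PySem.Set.empty [] h]
  have hupd : PySem.Set.update PySem.Set.empty (dictionary_key.toList.map pvSingle)
      = pvNews [] (dictionary_key.toList.map pvSingle) := by
    simpa [PySem.Set.empty] using pvUpdate_eq (dictionary_key.toList.map pvSingle) PySem.Set.empty
  simp only [hupd, List.nil_append]
  rw [← pvP dictionary_key.toList h]
  refine congrArg (pvNews [] _ ++ ·) (List.filter_congr ?_)
  intro a _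
  have : PySem.Set.contains (pvNews [] (dictionary_key.toList.map pvSingle)) a
      = (dictionary_key.toList.map pvSingle).contains a := by
    simp only [PySem.Set.contains]
    by_cases hmem : a ∈ (dictionary_key.toList.map pvSingle)
    · simp [hmem, (mem_pvNews_nil _ a).2 hmem]
    · have : a ∉ pvNews [] (dictionary_key.toList.map pvSingle) :=
        fun hx => hmem ((mem_pvNews_nil _ a).1 hx)
      simp [hmem, this]
  rw [this]

-- ===== VERDICT (by name: the statement is the Claim_ definition above) =====
theorem preapend_dictionary_key_to_base_alphabet_spec : Claim_equal_preapend_dictionary_key_to_base_alphabet := by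
  intro dictionary_key _ hpre
  have hpre' : ∀ c ∈ dictionary_key.toList, c ∈ pvUpper := by
    have hpre0 : dictionary_key.toList.all (fun c => pvUpper.contains c) = true := hpre
    simpa only [List.all_eq_true, List.contains_iff_mem] using hpre0
  unfold Spec_preapend_dictionary_key_to_base_alphabet
  rw [pvAport dictionary_key, pvAfoldr dictionary_key.toList hpre', pvBside dictionary_key hpre']
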